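-- pv_equiv track=rewrite | github.com/brownjuly2003-code/agentflow | scripts/check_schema_evolution.py | _group_by_entity
-- ===== SOURCE A (Python) =====
-- from typing import Any
--
-- def _normalize_version(version: Any) -> str:
--     normalized = str(version)
--     return normalized[1:] if normalized.startswith("v") else normalized
--
-- def _version_sort_key(version: str) -> tuple[int, int | str]:
--     normalized = _normalize_version(version)
--     return (0, int(normalized)) if normalized.isdigit() else (1, normalized)
--
-- def _group_by_entity(contracts: dict[str, dict[str, Any]]) -> dict[str, list[dict[str, Any]]]:
--     grouped: dict[str, list[dict[str, Any]]] = {}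
--     for payload in contracts.values():
--         entity = payload.get("entity")
--         version = payload.get("version")
--         if entity is None or version is None:
--             continue
--         grouped.setdefault(str(entity), []).append(payload)
--     for payloads in grouped.values():
--         payloads.sort(key=lambda item: _version_sort_key(str(item["version"])))
--     return grouped
-- ===== SOURCE B (Python) =====
-- from typing import Any
--
-- def _normalize_version(version: Any) -> str:
--     normalized = str(version)
--     return normalized[1:] if normalized.startswith("v") else normalized
--
-- def _version_sort_key(version: str) -> tuple[int, int | str]:
--     normalized = _normalize_version(version)
--     return (0, int(normalized)) if normalized.isdigit() else (1, normalized)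
--
-- def _group_by_entity(contracts: dict[str, dict[str, Any]]) -> dict[str, list[dict[str, Any]]]:
--     valid = [payload for payload in contracts.values()
--              if payload.get("entity") is not None and payload.get("version") is not None]
--     ordered = sorted(valid, key=lambda item: _version_sort_key(str(item["version"])))
--     grouped: dict[str, list[dict[str, Any]]] = {str(payload["entity"]): [] for payload in valid}
--     for payload in ordered:
--         grouped[str(payload["entity"])].append(payload)
--     return grouped
-- ===== Notes on version B (the rewrite author's own statement) =====
-- stated objective: alternative
-- what changed: B filters the valid payloads, sorts them ONCE globally by the version key, pre-seeds the group dict with entities in first-appearance order, and distributes the sorted payloads in a single stable pass, instead of A's group-first-then-sort-each-group.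
import Mathlib
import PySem

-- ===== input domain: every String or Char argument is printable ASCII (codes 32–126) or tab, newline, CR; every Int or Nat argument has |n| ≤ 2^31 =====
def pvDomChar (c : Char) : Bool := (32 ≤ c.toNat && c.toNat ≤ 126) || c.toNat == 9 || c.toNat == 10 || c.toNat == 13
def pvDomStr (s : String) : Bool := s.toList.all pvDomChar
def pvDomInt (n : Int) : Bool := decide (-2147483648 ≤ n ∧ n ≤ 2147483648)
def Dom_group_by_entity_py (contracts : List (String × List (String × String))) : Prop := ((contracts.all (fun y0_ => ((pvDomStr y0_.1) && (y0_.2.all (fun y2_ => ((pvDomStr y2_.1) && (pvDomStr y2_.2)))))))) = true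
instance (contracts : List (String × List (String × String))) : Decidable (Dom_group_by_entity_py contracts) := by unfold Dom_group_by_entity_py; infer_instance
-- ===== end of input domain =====

-- B regroups by sorting the valid payloads ONCE globally and distributing them in one stable pass,
-- instead of A's group-first-then-sort-every-group; same return value (an alternative decomposition, not claimed faster).

-- ===== PORT A =====
-- _normalize_version(version): str(version) is the identity here (version is already a string)
def pvNormVer (version : String) : String :=
  if PySem.Str.startswith version "v" then PySem.Str.slice version (some 1) none else version

-- _version_sort_key(version) = (0, int(normalized)) if normalized.isdigit() else (1, normalized),
-- encoded order-isomorphically into a single String (Lean pairs lack Python's lexicographic tuple <):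
-- digit case → "0" ++ ('b' per digit of the canonical decimal) ++ "a" ++ decimal, else → "1" ++ normalized.
-- The encoding preserves Python's key order and key equality exactly, so the stable sort is unchanged.
def pvVerKey (version : String) : String :=
  let normalized := pvNormVer version
  if PySem.Str.strIsdigit normalized then
    let d := PySem.Int.toStr ((PySem.Int.ofStr? normalized).getD 0)
    "0" ++ String.ofList (List.replicate d.toList.length 'b') ++ "a" ++ d
  else
    "1" ++ normalized

-- lambda item: _version_sort_key(str(item["version"])) — "version" is present in every payload this
-- key is applied to (both programs filtered on it), so getD's default is never taken.
def pvItemKey (item : List (String × String)) : String :=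
  pvVerKey ((PySem.Dict.mk item).getD "version" "")

def group_by_entity_py (contracts : List (String × List (String × String))) : List (String × List (List (String × String))) :=
  -- first loop: 'if entity is None or version is None: continue', then
  -- grouped.setdefault(str(entity), []).append(payload)  (modify k [] (· ++ [payload]) IS setdefault+append;
  -- entity is non-None in that branch, so .getD "" transliterates str(entity))
  let grouped : PySem.Dict String (List (List (String × String))) :=
    contracts.foldl (fun g kv =>
      let payload := kv.2
      let entity := (PySem.Dict.mk payload).get? "entity"
      let version := (PySem.Dict.mk payload).get? "version"
      if entity = none ∨ version = none then g
      else g.modify (entity.getD "") [] (· ++ [payload])) PySem.Dict.empty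
  -- second loop: payloads.sort(key=...) in place on each value of grouped
  grouped.items.map (fun kv => (kv.1, PySem.List.sorted kv.2 pvItemKey false))

-- ===== PORT B =====
def group_by_entity_py_alt (contracts : List (String × List (String × String))) : List (String × List (List (String × String))) :=
  let valid := (contracts.map (fun x => x.2)).filter
    (fun p => ((PySem.Dict.mk p).get? "entity").isSome && ((PySem.Dict.mk p).get? "version").isSome)
  let ordered := PySem.List.sorted valid pvItemKey false
  let seeded : PySem.Dict String (List (List (String × String))) :=
    valid.foldl (fun g p => g.insert ((PySem.Dict.mk p).getD "entity" "") []) PySem.Dict.empty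
  let grouped := ordered.foldl (fun g p => g.modify ((PySem.Dict.mk p).getD "entity" "") [] (· ++ [p])) seeded
  grouped.items

-- ===== PRECONDITION & SPEC =====
def Spec_group_by_entity_py (contracts : List (String × List (String × String))) (out : List (String × List (List (String × String)))) : Prop := out = group_by_entity_py_alt contracts
instance (contracts : List (String × List (String × String))) (out : List (String × List (List (String × String)))) : Decidable (Spec_group_by_entity_py contracts out) := by unfold Spec_group_by_entity_py; infer_instance

-- ===== CLAIM (what is proved, stated in full; the proofs are below) =====
def Claim_equal_group_by_entity_py : Prop := ∀ (contracts : List (String × List (String × String))), Dom_group_by_entity_py contracts → Spec_group_by_entity_py contracts (group_by_entity_py contracts)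

-- ===== LEMMAS AND PROOFS =====

-- proof-side abbreviations (definitionally the terms the ports use)
def pvEnt (p : List (String × String)) : String := (PySem.Dict.mk p).getD "entity" ""
def pvPred (p : List (String × String)) : Bool :=
  ((PySem.Dict.mk p).get? "entity").isSome && ((PySem.Dict.mk p).get? "version").isSome

-- dedup of a snoc
theorem pv_dedup_snoc {α : Type} [BEq α] [LawfulBEq α] (xs : List α) (a : α) :
    PySem.List.dedup (xs ++ [a]) =
      if a ∈ xs then PySem.List.dedup xs else PySem.List.dedup xs ++ [a] := by
  have hmem := PySem.List.mem_dedup xs a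
  simp only [PySem.List.dedup_eq_ofList] at hmem ⊢
  simp only [PySem.Set.ofList, List.foldl_append, List.foldl_cons, List.foldl_nil]
  rw [show List.foldl PySem.Set.add PySem.Set.empty xs = PySem.Set.ofList xs from rfl]
  unfold PySem.Set.add
  by_cases h : a ∈ xs
  · rw [if_pos h, if_pos (by simpa using hmem.mpr h)]
  · rw [if_neg h, if_neg (by simpa using fun hc => h (hmem.mp hc))]

-- dicts whose items are K.map (fun k => (k, F k))
theorem pv_get?_mkmap {ν : Type} (K : List String) (F : String → ν) (e : String) :
    (PySem.Dict.mk (K.map (fun k => (k, F k)))).get? e = if e ∈ K then some (F e) else none := by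
  induction K with
  | nil => simp [PySem.Dict.get?]
  | cons k K ih =>
    simp only [List.map_cons, PySem.Dict.get?_mk_cons]
    by_cases h : k = e
    · subst h; simp
    · rw [if_neg (by simpa using h), ih]
      by_cases h2 : e ∈ K
      · rw [if_pos h2, if_pos (List.mem_cons_of_mem _ h2)]
      · rw [if_neg h2, if_neg (by
          intro hc
          rcases List.mem_cons.mp hc with he | h3
          · exact h he.symm
          · exact h2 h3)]

theorem pv_contains_mkmap {ν : Type} (K : List String) (F : String → ν) (e : String) :
    (PySem.Dict.mk (K.map (fun k => (k, F k)))).contains e = decide (e ∈ K) := by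
  induction K with
  | nil => simp [PySem.Dict.contains]
  | cons k K ih =>
    simp only [List.map_cons]
    by_cases h : k = e
    · subst h; simp [PySem.Dict.contains]
    · have hne : (k == e) = false := by simpa using h
      simp only [PySem.Dict.contains, List.any_cons, hne, Bool.false_or] at ih ⊢
      rw [ih]
      by_cases h2 : e ∈ K
      · simp [h2, List.mem_cons]
      · simp [h2, List.mem_cons]
        exact fun he => h he.symm

theorem pv_insert_mkmap {ν : Type} (K : List String) (F : String → ν) (e : String) (v : ν) :
    (PySem.Dict.mk (K.map (fun k => (k, F k)))).insert e v =
      PySem.Dict.mk (if e ∈ K then K.map (fun k => (k, if k = e then v else F k))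
                     else K.map (fun k => (k, F k)) ++ [(e, v)]) := by
  unfold PySem.Dict.insert
  rw [pv_contains_mkmap]
  by_cases h : e ∈ K
  · rw [if_pos (by simpa using h), if_pos h]
    congr 1
    rw [List.map_map]
    apply List.map_congr_left
    intro k hk
    by_cases h2 : k = e
    · subst h2; simp
    · simp [h2]
  · rw [if_neg (by simpa using h), if_neg h]

-- modifying an existing key of such a dict
theorem pv_modify_mkmap (K : List String) (F : String → List (List (String × String)))
    (e : String) (p : List (String × String)) (he : e ∈ K) :
    (PySem.Dict.mk (K.map (fun k => (k, F k)))).modify e [] (· ++ [p]) =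
      PySem.Dict.mk (K.map (fun k => (k, if k = e then F e ++ [p] else F k))) := by
  unfold PySem.Dict.modify PySem.Dict.getD
  rw [pv_get?_mkmap, if_pos he, pv_insert_mkmap, if_pos he]
  simp only [Option.getD_some]

-- the grouping fold of port A, characterised
theorem pv_items_groupFold (L : List (List (String × String))) :
    (L.foldl (fun g p => g.modify (pvEnt p) [] (· ++ [p])) PySem.Dict.empty).items =
      (PySem.List.dedup (L.map pvEnt)).map
        (fun k => (k, L.filter (fun q => pvEnt q == k))) := by
  induction L using List.reverseRecOn with
  | nil => rfl
  | append_singleton L p ih =>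
    rw [List.foldl_append, List.foldl_cons, List.foldl_nil]
    have hD : L.foldl (fun g p => g.modify (pvEnt p) [] (· ++ [p])) PySem.Dict.empty
        = PySem.Dict.mk ((PySem.List.dedup (L.map pvEnt)).map
            (fun k => (k, L.filter (fun q => pvEnt q == k)))) := PySem.Dict.ext ih
    rw [hD]
    unfold PySem.Dict.modify PySem.Dict.getD
    rw [pv_get?_mkmap, pv_insert_mkmap, List.map_append, List.map_cons, List.map_nil,
        pv_dedup_snoc]
    by_cases h : pvEnt p ∈ L.map pvEnt
    · have hK : pvEnt p ∈ PySem.List.dedup (L.map pvEnt) := (PySem.List.mem_dedup _ _).mpr h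
      rw [if_pos hK, if_pos hK, if_pos h]
      simp only [Option.getD_some]
      apply List.map_congr_left
      intro k hk
      rw [List.filter_append]
      simp only [List.filter_cons, List.filter_nil]
      by_cases h2 : k = pvEnt p
      · subst h2
        simp
      · simp [h2, show (pvEnt p == k) = false from by simpa using fun hh : pvEnt p = k => h2 hh.symm]
    · have hK : pvEnt p ∉ PySem.List.dedup (L.map pvEnt) := fun hc => h ((PySem.List.mem_dedup _ _).mp hc)
      rw [if_neg hK, if_neg hK, if_neg h, List.map_append]
      simp only [Option.getD_none, List.nil_append]
      congr 1
      · apply List.map_congr_left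
        intro k hk
        have hkL : k ∈ L.map pvEnt := (PySem.List.mem_dedup _ _).mp hk
        have hke : ¬ (pvEnt p = k) := fun h2 => h (h2 ▸ hkL)
        rw [List.filter_append]
        simp [show (pvEnt p == k) = false from by simpa using hke]
      · have hnil : L.filter (fun q => pvEnt q == pvEnt p) = [] := by
          rw [List.filter_eq_nil_iff]
          intro q hq
          simp only [beq_iff_eq]
          intro hc
          exact h (hc ▸ List.mem_map_of_mem hq)
        simp [List.filter_append, List.filter_cons, hnil]

-- port B's seeding fold
theorem pv_items_seedFold (L : List (List (String × String))) :
    (L.foldl (fun g p => g.insert (pvEnt p) ([] : List (List (String × String)))) PySem.Dict.empty).items =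
      (PySem.List.dedup (L.map pvEnt)).map (fun k => (k, ([] : List (List (String × String))))) := by
  induction L using List.reverseRecOn with
  | nil => rfl
  | append_singleton L p ih =>
    rw [List.foldl_append, List.foldl_cons, List.foldl_nil]
    have hD : L.foldl (fun g p => g.insert (pvEnt p) ([] : List (List (String × String)))) PySem.Dict.empty
        = PySem.Dict.mk ((PySem.List.dedup (L.map pvEnt)).map
            (fun k => (k, ([] : List (List (String × String)))))) := PySem.Dict.ext ih
    rw [hD, pv_insert_mkmap, List.map_append, List.map_cons, List.map_nil, pv_dedup_snoc]
    by_cases h : pvEnt p ∈ L.map pvEnt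
    · rw [if_pos ((PySem.List.mem_dedup _ _).mpr h), if_pos h]
      simp [ite_self]
    · rw [if_neg (fun hc => h ((PySem.List.mem_dedup _ _).mp hc)), if_neg h]
      simp [List.map_append]

-- port B's distribution fold (no key is new there)
theorem pv_items_appendFold (O : List (List (String × String))) (K : List String)
    (F : String → List (List (String × String)))
    (d : PySem.Dict String (List (List (String × String))))
    (hd : d.items = K.map (fun k => (k, F k)))
    (hmem : ∀ p ∈ O, pvEnt p ∈ K) :
    (O.foldl (fun g p => g.modify (pvEnt p) [] (· ++ [p])) d).items =
      K.map (fun k => (k, F k ++ O.filter (fun q => pvEnt q == k))) := by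
  induction O generalizing F d with
  | nil => simpa using hd
  | cons p O ih =>
    have he : pvEnt p ∈ K := hmem p (List.mem_cons_self ..)
    have hDeq : d = PySem.Dict.mk (K.map fun k => (k, F k)) := PySem.Dict.ext hd
    rw [List.foldl_cons, hDeq, pv_modify_mkmap K F (pvEnt p) p he,
        ih (fun k => if k = pvEnt p then F (pvEnt p) ++ [p] else F k)
          (PySem.Dict.mk (K.map (fun k => (k, if k = pvEnt p then F (pvEnt p) ++ [p] else F k)))) rfl
          (fun q hq => hmem q (List.mem_cons_of_mem _ hq))]
    apply List.map_congr_left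
    intro k hk
    simp only [List.filter_cons]
    by_cases h2 : k = pvEnt p
    · subst h2
      simp
    · simp [h2, show (pvEnt p == k) = false from by simpa using fun hh : pvEnt p = k => h2 hh.symm]

-- a conditional fold is a fold over the filter
theorem pv_foldl_if_filter {α β : Type} (q : α → Bool) (step : β → α → β) (L : List α) (g0 : β) :
    L.foldl (fun g p => if q p then step g p else g) g0 = (L.filter q).foldl step g0 := by
  induction L generalizing g0 with
  | nil => rfl
  | cons a L ih =>
    rw [List.foldl_cons, List.filter_cons]
    by_cases h : q a = true
    · rw [if_pos h, if_pos h, List.foldl_cons, ih]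
    · rw [if_neg h, if_neg h, ih]

-- stable insertion sort commutes with filter
theorem pv_insertBy_front {α : Type} (before : α → α → Bool) (x : α) (l : List α)
    (h : ∀ z ∈ l, before x z = true) : PySem.List.insertBy before x l = x :: l := by
  cases l with
  | nil => simp [PySem.List.insertBy]
  | cons y t => simp [PySem.List.insertBy, h y (List.mem_cons_self ..)]

theorem pv_pairwise_insertBy {α κ : Type} [LinearOrder κ] (key : α → κ) (x : α) (acc : List α)
    (h : acc.Pairwise (fun a b => key a ≤ key b)) :
    (PySem.List.insertBy (fun a b => decide (key a < key b)) x acc).Pairwise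
      (fun a b => key a ≤ key b) := by
  induction acc with
  | nil => simp [PySem.List.insertBy]
  | cons y t ih =>
    rw [List.pairwise_cons] at h
    obtain ⟨h1, h2⟩ := h
    by_cases hb : key x < key y
    · rw [show PySem.List.insertBy (fun a b => decide (key a < key b)) x (y :: t) = x :: y :: t
          from by simp [PySem.List.insertBy, hb]]
      refine List.Pairwise.cons ?_ (List.Pairwise.cons h1 h2)
      intro b hb2
      rcases List.mem_cons.mp hb2 with rfl | hbt
      · exact le_of_lt hb
      · exact (le_of_lt hb).trans (h1 b hbt)
    · rw [show PySem.List.insertBy (fun a b => decide (key a < key b)) x (y :: t)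
            = y :: PySem.List.insertBy (fun a b => decide (key a < key b)) x t
          from by simp [PySem.List.insertBy, hb]]
      refine List.Pairwise.cons ?_ (ih h2)
      intro b hbmem
      rcases (PySem.List.mem_insertBy _ x b t).mp hbmem with rfl | hbt
      · exact not_lt.mp hb
      · exact h1 b hbt

theorem pv_filter_insertBy {α κ : Type} [LinearOrder κ] (key : α → κ) (q : α → Bool) (x : α)
    (acc : List α) (h : acc.Pairwise (fun a b => key a ≤ key b)) :
    (PySem.List.insertBy (fun a b => decide (key a < key b)) x acc).filter q =
      if q x then PySem.List.insertBy (fun a b => decide (key a < key b)) x (acc.filter q)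
      else acc.filter q := by
  induction acc with
  | nil =>
    by_cases hx : q x = true <;> simp [PySem.List.insertBy, hx]
  | cons y t ih =>
    rw [List.pairwise_cons] at h
    obtain ⟨h1, h2⟩ := h
    by_cases hb : key x < key y
    · rw [show PySem.List.insertBy (fun a b => decide (key a < key b)) x (y :: t) = x :: y :: t
          from by simp [PySem.List.insertBy, hb]]
      by_cases hx : q x = true
      · rw [if_pos hx]
        have hfront : PySem.List.insertBy (fun a b => decide (key a < key b)) x ((y :: t).filter q)
            = x :: (y :: t).filter q := by
          apply pv_insertBy_front
          intro z hz
          have hzmem : z ∈ y :: t := List.mem_of_mem_filter hz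
          have hyz : key y ≤ key z := by
            rcases List.mem_cons.mp hzmem with rfl | hzt
            · exact le_rfl
            · exact h1 z hzt
          simpa using lt_of_lt_of_le hb hyz
        rw [hfront, List.filter_cons, if_pos hx]
      · rw [if_neg hx, List.filter_cons, if_neg hx]
    · rw [show PySem.List.insertBy (fun a b => decide (key a < key b)) x (y :: t)
            = y :: PySem.List.insertBy (fun a b => decide (key a < key b)) x t
          from by simp [PySem.List.insertBy, hb]]
      have iht := ih h2
      by_cases hy : q y = true
      · rw [List.filter_cons, if_pos hy, iht, List.filter_cons, if_pos hy]
        by_cases hx : q x = true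
        · rw [if_pos hx, if_pos hx,
              show PySem.List.insertBy (fun a b => decide (key a < key b)) x (y :: t.filter q)
                  = y :: PySem.List.insertBy (fun a b => decide (key a < key b)) x (t.filter q)
                from by simp [PySem.List.insertBy, hb]]
        · rw [if_neg hx, if_neg hx]
      · rw [List.filter_cons, if_neg hy, iht, List.filter_cons, if_neg hy]

theorem pv_foldl_insertBy_filter {α κ : Type} [LinearOrder κ] (key : α → κ) (q : α → Bool)
    (L : List α) (acc : List α) (h : acc.Pairwise (fun a b => key a ≤ key b)) :
    (L.foldl (fun acc x => PySem.List.insertBy (fun a b => decide (key a < key b)) x acc) acc).filter q =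
      (L.filter q).foldl (fun acc x => PySem.List.insertBy (fun a b => decide (key a < key b)) x acc)
        (acc.filter q) := by
  induction L generalizing acc with
  | nil => rfl
  | cons x L ih =>
    rw [List.foldl_cons, List.filter_cons, ih _ (pv_pairwise_insertBy key x acc h),
        pv_filter_insertBy key q x acc h]
    by_cases hx : q x = true
    · rw [if_pos hx, if_pos hx, List.foldl_cons]
    · rw [if_neg hx, if_neg hx]

theorem pv_sorted_filter {α κ : Type} [LinearOrder κ] (key : α → κ) (q : α → Bool) (L : List α) :
    PySem.List.sorted (L.filter q) key false = (PySem.List.sorted L key false).filter q := by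
  rw [PySem.List.sorted_eq_foldl_insertBy, PySem.List.sorted_eq_foldl_insertBy]
  have h := pv_foldl_insertBy_filter key q L [] (by simp)
  simpa using h.symm

-- port A, characterised
theorem pv_A_char (contracts : List (String × List (String × String))) :
    group_by_entity_py contracts =
      (PySem.List.dedup (((contracts.map (fun x => x.2)).filter pvPred).map pvEnt)).map
        (fun k => (k, PySem.List.sorted
          (((contracts.map (fun x => x.2)).filter pvPred).filter (fun q => pvEnt q == k))
          pvItemKey false)) := by
  have hstep : ∀ (g : PySem.Dict String (List (List (String × String)))) (kv : String × List (String × String)),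
      (if (PySem.Dict.mk kv.2).get? "entity" = none ∨ (PySem.Dict.mk kv.2).get? "version" = none then g
       else g.modify (((PySem.Dict.mk kv.2).get? "entity").getD "") [] (· ++ [kv.2]))
      = if pvPred kv.2 then g.modify (pvEnt kv.2) [] (· ++ [kv.2]) else g := by
    intro g kv
    cases h1 : (PySem.Dict.mk kv.2).get? "entity" <;>
      cases h2 : (PySem.Dict.mk kv.2).get? "version" <;>
        simp [pvPred, pvEnt, PySem.Dict.getD, h1, h2]
  have hfold : contracts.foldl (fun g kv =>
        if (PySem.Dict.mk kv.2).get? "entity" = none ∨ (PySem.Dict.mk kv.2).get? "version" = none then g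
        else g.modify (((PySem.Dict.mk kv.2).get? "entity").getD "") [] (· ++ [kv.2])) PySem.Dict.empty
      = ((contracts.map (fun x => x.2)).filter pvPred).foldl
          (fun g p => g.modify (pvEnt p) [] (· ++ [p])) PySem.Dict.empty := by
    calc contracts.foldl (fun g kv =>
        if (PySem.Dict.mk kv.2).get? "entity" = none ∨ (PySem.Dict.mk kv.2).get? "version" = none then g
        else g.modify (((PySem.Dict.mk kv.2).get? "entity").getD "") [] (· ++ [kv.2])) PySem.Dict.empty
        = contracts.foldl (fun g kv => if pvPred kv.2 then g.modify (pvEnt kv.2) [] (· ++ [kv.2]) else g)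
            PySem.Dict.empty :=
          congrArg (fun f => List.foldl f PySem.Dict.empty contracts)
            (funext fun g => funext fun kv => hstep g kv)
      _ = (contracts.filter (fun kv => pvPred kv.2)).foldl
            (fun g kv => g.modify (pvEnt kv.2) [] (· ++ [kv.2])) PySem.Dict.empty :=
          pv_foldl_if_filter _ _ _ _
      _ = ((contracts.map (fun x => x.2)).filter pvPred).foldl
            (fun g p => g.modify (pvEnt p) [] (· ++ [p])) PySem.Dict.empty := by
          rw [List.filter_map, List.foldl_map]
          rfl
  calc group_by_entity_py contracts
      = (((contracts.map (fun x => x.2)).filter pvPred).foldl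
          (fun g p => g.modify (pvEnt p) [] (· ++ [p])) PySem.Dict.empty).items.map
          (fun kv => (kv.1, PySem.List.sorted kv.2 pvItemKey false)) :=
        congrArg (fun d : PySem.Dict String (List (List (String × String))) =>
          List.map (fun kv : String × List (List (String × String)) =>
            (kv.1, PySem.List.sorted kv.2 pvItemKey false)) d.items) hfold
    _ = _ := by
        rw [pv_items_groupFold, List.map_map]
        rfl

-- port B, characterised
theorem pv_B_char (contracts : List (String × List (String × String))) :
    group_by_entity_py_alt contracts =
      (PySem.List.dedup (((contracts.map (fun x => x.2)).filter pvPred).map pvEnt)).map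
        (fun k => (k, (PySem.List.sorted ((contracts.map (fun x => x.2)).filter pvPred) pvItemKey false).filter
          (fun q => pvEnt q == k))) := by
  show ((PySem.List.sorted ((contracts.map (fun x => x.2)).filter pvPred) pvItemKey false).foldl
          (fun g p => g.modify (pvEnt p) [] (· ++ [p]))
          (((contracts.map (fun x => x.2)).filter pvPred).foldl
            (fun g p => g.insert (pvEnt p) ([] : List (List (String × String)))) PySem.Dict.empty)).items = _
  rw [pv_items_appendFold _ (PySem.List.dedup (((contracts.map (fun x => x.2)).filter pvPred).map pvEnt))
      (fun _ => ([] : List (List (String × String)))) _ (pv_items_seedFold _) ?_]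
  · apply List.map_congr_left
    intro k hk
    simp only [List.nil_append]
  · intro p hp
    rw [PySem.List.mem_sorted] at hp
    exact (PySem.List.mem_dedup _ _).mpr (List.mem_map_of_mem hp)

-- ===== VERDICT (by name: the statement is the Claim_ definition above) =====
theorem group_by_entity_py_spec : Claim_equal_group_by_entity_py := by
  intro contracts _
  show group_by_entity_py contracts = group_by_entity_py_alt contracts
  rw [pv_A_char, pv_B_char]
  apply List.map_congr_left
  intro k hk
  rw [pv_sorted_filter]
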